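-- pv_equiv track=rewrite | github.com/eugder/PE | Lists.py | concatenate_two
-- ===== SOURCE A (Python) =====
-- def concatenate_two(list1: list[str], list2: list[str]) -> list[str]:
--     size = min(len(list1), len(list2))
--     result = []
--     for i in range(size):
--         result.append(list1[i] + list2[i])
--     if len(list1) > len(list2):
--         result = result + list1[size:]
--     elif len(list2) > len(list1):
--         result = result + list2[size:]
--
--     return result
-- ===== SOURCE B (Python) =====
-- def concatenate_two(list1: list[str], list2: list[str]) -> list[str]:
--     # Back-to-front: build the result reversed, starting with the longer
--     # list's tail (scanned descending), then the pairwise concatenations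
--     # (also descending), and reverse once at the end.
--     rev = []
--     i, j = len(list1), len(list2)
--     while i > j:
--         i -= 1
--         rev.append(list1[i])
--     while j > i:
--         j -= 1
--         rev.append(list2[j])
--     while i > 0:
--         i -= 1
--         rev.append(list1[i] + list2[i])
--     return rev[::-1]
-- ===== Notes on version B (the rewrite author's own statement) =====
-- stated objective: alternative
-- what changed: Replaces the forward index loop plus length-comparison tail-concatenation branches with a back-to-front construction: three descending while-loops push the longer list's tail and then the pairwise concatenations onto a reversed accumulator, which is reversed once at the end; no length comparison branch or slice remains.
import Mathlib
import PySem

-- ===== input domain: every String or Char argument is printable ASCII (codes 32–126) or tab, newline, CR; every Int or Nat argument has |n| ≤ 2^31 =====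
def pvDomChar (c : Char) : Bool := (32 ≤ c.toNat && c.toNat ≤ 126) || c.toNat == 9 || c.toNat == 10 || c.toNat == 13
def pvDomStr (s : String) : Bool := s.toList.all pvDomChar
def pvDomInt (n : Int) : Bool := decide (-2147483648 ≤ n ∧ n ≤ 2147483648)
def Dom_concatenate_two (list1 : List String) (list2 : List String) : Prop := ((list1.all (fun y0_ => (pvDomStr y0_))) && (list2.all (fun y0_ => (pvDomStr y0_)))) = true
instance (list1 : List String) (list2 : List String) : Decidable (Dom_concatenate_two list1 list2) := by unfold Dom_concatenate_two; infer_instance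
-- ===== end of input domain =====

-- B builds the result back-to-front with a reversed accumulator (alternative decomposition); return values proved equal.


-- ===== PORT A =====
def concatenate_two (list1 : List String) (list2 : List String) : List String :=
  let size : Int := min (list1.length : Int) (list2.length : Int)
  let result : List String := (PySem.List.pyRange 0 size 1).foldl
    (fun acc i => acc ++ [PySem.List.pyGetD list1 i "" ++ PySem.List.pyGetD list2 i ""]) []
  if (list1.length : Int) > (list2.length : Int) then
    result ++ PySem.List.slice list1 (some size) none
  else if (list2.length : Int) > (list1.length : Int) then
    result ++ PySem.List.slice list2 (some size) none
  else
    result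

-- ===== PORT B =====
-- 'while i > j: i -= 1; rev.append(list1[i])' as recursion on the counter i
-- (index i-1 is in range whenever the loop body runs, so getD's default is never used)
def descTail (l : List String) (i j : Nat) (acc : List String) : List String :=
  if i > j then descTail l (i - 1) j (acc ++ [l.getD (i - 1) ""]) else acc
termination_by i - j
decreasing_by omega

-- 'while i > 0: i -= 1; rev.append(list1[i] + list2[i])'
def descPairs (l1 l2 : List String) (i : Nat) (acc : List String) : List String :=
  if i > 0 then descPairs l1 l2 (i - 1) (acc ++ [l1.getD (i - 1) "" ++ l2.getD (i - 1) ""]) else acc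
termination_by i
decreasing_by omega

def concatenate_two_alt (list1 : List String) (list2 : List String) : List String :=
  let i := list1.length
  let j := list2.length
  let rev := descTail list1 i j []          -- while i > j (leaves i = min i j)
  let rev := descTail list2 j i rev         -- while j > i (leaves j = min i j)
  let rev := descPairs list1 list2 (min i j) rev   -- while i > 0, where i = min i j after the loops
  rev.reverse                               -- rev[::-1]

-- ===== PRECONDITION & SPEC =====
def Spec_concatenate_two (list1 : List String) (list2 : List String) (out : List String) : Prop := out = concatenate_two_alt list1 list2
instance (list1 : List String) (list2 : List String) (out : List String) : Decidable (Spec_concatenate_two list1 list2 out) := by unfold Spec_concatenate_two; infer_instance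

-- ===== CLAIM (what is proved, stated in full; the proofs are below) =====
def Claim_equal_concatenate_two : Prop := ∀ (list1 : List String) (list2 : List String), Dom_concatenate_two list1 list2 → Spec_concatenate_two list1 list2 (concatenate_two list1 list2)

-- ===== LEMMAS AND PROOFS =====

theorem map_range_min (l1 l2 : List String) :
    (List.range (min l1.length l2.length)).map (fun i => l1.getD i "" ++ l2.getD i "") =
      List.zipWith (· ++ ·) l1 l2 := by
  apply List.ext_getElem
  · simp
  · intro i h1 h2
    simp at h1
    simp [List.getD, List.getElem?_eq_getElem (by omega : i < l1.length),
      List.getElem?_eq_getElem (by omega : i < l2.length)]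

theorem port_a_eq_canon (l1 l2 : List String) :
    concatenate_two l1 l2 =
      List.zipWith (· ++ ·) l1 l2 ++ l1.drop (min l1.length l2.length) ++ l2.drop (min l1.length l2.length) := by
  unfold concatenate_two
  dsimp only
  have hmin : min (l1.length : Int) (l2.length : Int) = ((min l1.length l2.length : Nat) : Int) := by
    omega
  rw [hmin, PySem.List.pyRange_zero_natCast,
    PySem.List.foldl_append_singleton_eq_map, List.map_map]
  have hm : (List.range (min l1.length l2.length)).map
      ((fun i => PySem.List.pyGetD l1 i "" ++ PySem.List.pyGetD l2 i "") ∘ fun (k : Nat) => (k : Int)) =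
      List.zipWith (· ++ ·) l1 l2 := by
    rw [← map_range_min l1 l2]
    apply List.map_congr_left
    intro i _
    simp [PySem.List.pyGetD_natCast]
  rw [hm]
  rcases lt_trichotomy l1.length l2.length with h | h | h
  · rw [if_neg (by omega), if_pos (by omega), PySem.List.slice_from_natCast]
    have : min l1.length l2.length = l1.length := by omega
    simp [this]
  · rw [if_neg (by omega), if_neg (by omega)]
    simp [h]
  · rw [if_pos (by omega), PySem.List.slice_from_natCast]
    have : min l1.length l2.length = l2.length := by omega
    simp [this]

theorem descTail_eq (l : List String) (i j : Nat) (acc : List String)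
    (hi : i ≤ l.length) :
    descTail l i j acc = acc ++ ((l.take i).drop j).reverse := by
  induction i, acc using descTail.induct l j with
  | case1 i acc h ih =>
    rw [descTail, if_pos h, ih (by omega)]
    have hlt : i - 1 < l.length := by omega
    have htake : l.take i = l.take (i - 1) ++ [l[i - 1]] := by
      conv_lhs => rw [show i = (i - 1) + 1 by omega]
      rw [List.take_add_one, List.getElem?_eq_getElem hlt]
      simp
    rw [htake, List.drop_append_of_le_length (by simp; omega)]
    simp [List.getD, List.getElem?_eq_getElem hlt]
  | case2 i acc h =>
    rw [descTail, if_neg h]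
    have : i ≤ j := by omega
    simp [List.drop_eq_nil_of_le (by simp; omega : ((l.take i).length ≤ j))]

theorem descPairs_eq (l1 l2 : List String) (i : Nat) (acc : List String)
    (h1 : i ≤ l1.length) (h2 : i ≤ l2.length) :
    descPairs l1 l2 i acc = acc ++ (List.zipWith (· ++ ·) (l1.take i) (l2.take i)).reverse := by
  induction i, acc using descPairs.induct l1 l2 with
  | case1 i acc h ih =>
    rw [descPairs, if_pos h, ih (by omega) (by omega)]
    have e1 : i - 1 < l1.length := by omega
    have e2 : i - 1 < l2.length := by omega
    have ht1 : l1.take i = l1.take (i - 1) ++ [l1[i - 1]] := by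
      conv_lhs => rw [show i = (i - 1) + 1 by omega]
      rw [List.take_add_one, List.getElem?_eq_getElem e1]; simp
    have ht2 : l2.take i = l2.take (i - 1) ++ [l2[i - 1]] := by
      conv_lhs => rw [show i = (i - 1) + 1 by omega]
      rw [List.take_add_one, List.getElem?_eq_getElem e2]; simp
    rw [ht1, ht2, List.zipWith_append
      (show (l1.take (i - 1)).length = (l2.take (i - 1)).length by
        simp; omega)]
    simp [List.getD, List.getElem?_eq_getElem e1, List.getElem?_eq_getElem e2]
  | case2 i acc h =>
    have : i = 0 := by omega
    rw [descPairs, if_neg h]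
    simp [this]

theorem zipWith_take_min (l1 l2 : List String) :
    List.zipWith (· ++ ·) (l1.take (min l1.length l2.length)) (l2.take (min l1.length l2.length)) =
      List.zipWith (· ++ ·) l1 l2 := by
  rw [← List.take_zipWith]
  exact List.take_of_length_le (by simp)

theorem alt_eq_canon (l1 l2 : List String) :
    concatenate_two_alt l1 l2 =
      List.zipWith (· ++ ·) l1 l2 ++ l1.drop (min l1.length l2.length) ++ l2.drop (min l1.length l2.length) := by
  unfold concatenate_two_alt
  dsimp only
  rw [descTail_eq _ _ _ _ (le_refl _), descTail_eq _ _ _ _ (le_refl _),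
      descPairs_eq _ _ _ _ (by omega) (by omega), zipWith_take_min]
  simp only [List.take_length, List.nil_append, List.reverse_append, List.reverse_reverse,
    List.append_assoc]
  rcases Nat.le_total l1.length l2.length with h | h
  · rw [min_eq_left h, List.drop_eq_nil_of_le h, List.drop_eq_nil_of_le (le_refl _)]
    simp
  · rw [min_eq_right h, List.drop_eq_nil_of_le h, List.drop_eq_nil_of_le (le_refl _)]
    simp

-- ===== VERDICT (by name: the statement is the Claim_ definition above) =====
theorem concatenate_two_spec : Claim_equal_concatenate_two := by
  intro l1 l2 _
  unfold Spec_concatenate_two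
  rw [alt_eq_canon, port_a_eq_canon]
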